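-- pv_equiv track=rewrite | github.com/phansol/gremlin | codes/3_feature_extraction/sv_functions.py | find_M_range
-- ===== SOURCE A (Python) =====
-- def find_M_range(cigartuples):
-- 	m_start = m_end = 0  # m_start: just before the start, m_end= the exact end
-- 	m_count=0
-- 	for (t, n) in cigartuples:
-- 		if t == 0:
-- 			m_count +=1
-- 	if m_count ==1:
-- 		for (t,n) in cigartuples:
-- 			if t!=0 and t!=1:
-- 				m_start+=n
-- 			elif t==0:
-- 				m_end=m_start+n
-- 				break
-- 	elif m_count > 1:
-- 		find_m=0;m_length=0
-- 		for (t,n) in cigartuples: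
-- 			if find_m==0 and t!=0 and t!=1:
-- 				m_start+=n
-- 			elif find_m >0 and t!=0 and t!=1:
-- 				m_length+=n
-- 			elif t==0:
-- 				find_m+=1
-- 				if find_m < m_count:
-- 					m_length+=n
-- 				elif find_m == m_count:
-- 					m_end=m_start+m_length
-- 					break
-- 	return (m_start, m_end)
-- ===== SOURCE B (Python) =====
-- def find_M_range(cigartuples):
--     # prefix sums of lengths excluding insertions (t == 1), plus the list of M indices
--     pos = [0]
--     for t, n in cigartuples:
--         pos.append(pos[-1] + (n if t != 1 else 0))
--     m_idx = [i for i, (t, n) in enumerate(cigartuples) if t == 0]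
--     if not m_idx:
--         return (0, 0)
--     if len(m_idx) == 1:
--         return (pos[m_idx[0]], pos[m_idx[0] + 1])
--     return (pos[m_idx[0]], pos[m_idx[-1]])
-- ===== Notes on version B (the rewrite author's own statement) =====
-- stated objective: simpler
-- what changed: Replaces A's three state-machine loops (count pass plus two break-driven accumulator loops with find_m/m_length state) by one prefix-sum array of lengths excluding insertions plus the list of M indices, reading the answer off as pos[first]/pos[first+1]/pos[last].
import Mathlib
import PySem

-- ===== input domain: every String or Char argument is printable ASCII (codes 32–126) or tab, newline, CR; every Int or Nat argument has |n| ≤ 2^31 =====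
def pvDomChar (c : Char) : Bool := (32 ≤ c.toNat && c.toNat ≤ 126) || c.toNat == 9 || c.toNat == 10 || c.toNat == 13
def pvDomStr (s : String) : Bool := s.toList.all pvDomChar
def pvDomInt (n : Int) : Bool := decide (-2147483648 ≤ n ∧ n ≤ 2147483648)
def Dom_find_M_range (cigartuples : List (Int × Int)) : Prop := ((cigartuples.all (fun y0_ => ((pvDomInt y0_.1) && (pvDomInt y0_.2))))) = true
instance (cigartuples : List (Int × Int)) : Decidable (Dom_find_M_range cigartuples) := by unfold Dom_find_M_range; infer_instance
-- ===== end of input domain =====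

-- B replaces A's three state-machine loops by a prefix-sum array (lengths excluding
-- insertions) plus the list of M indices; objective: simpler. Proved equal on all inputs.


-- ===== PORT A =====
-- first loop: count M operations
def pvCountLoop : List (Int × Int) → Int → Int
  | [], c => c
  | (t, _) :: rest, c => pvCountLoop rest (if t == 0 then c + 1 else c)

-- loop of the m_count == 1 branch (break at the M)
def pvSingleLoop : List (Int × Int) → Int → Int × Int
  | [], ms => (ms, 0)
  | (t, n) :: rest, ms =>
    if t ≠ 0 ∧ t ≠ 1 then pvSingleLoop rest (ms + n)
    else if t == 0 then (ms, ms + n)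
    else pvSingleLoop rest ms

-- loop of the m_count > 1 branch (state find_m, m_start, m_length; break at the last M)
def pvMultiLoop : List (Int × Int) → Int → Int → Int → Int → Int × Int
  | [], _, ms, _, _ => (ms, 0)
  | (t, n) :: rest, fm, ms, ml, mc =>
    if fm == 0 ∧ t ≠ 0 ∧ t ≠ 1 then pvMultiLoop rest fm (ms + n) ml mc
    else if fm > 0 ∧ t ≠ 0 ∧ t ≠ 1 then pvMultiLoop rest fm ms (ml + n) mc
    else if t == 0 then
      (if fm + 1 < mc then pvMultiLoop rest (fm + 1) ms (ml + n) mc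
       else if fm + 1 == mc then (ms, ms + ml)
       else pvMultiLoop rest (fm + 1) ms ml mc)
    else pvMultiLoop rest fm ms ml mc

def find_M_range (cigartuples : List (Int × Int)) : Int × Int :=
  let m_count := pvCountLoop cigartuples 0
  if m_count == 1 then pvSingleLoop cigartuples 0
  else if m_count > 1 then pvMultiLoop cigartuples 0 0 0 m_count
  else (0, 0)

-- ===== PORT B =====
-- pos: prefix sums of lengths, excluding insertions (t == 1)
def pvPrefixPos : List (Int × Int) → Int → List Int
  | [], acc => [acc]
  | (t, n) :: rest, acc => acc :: pvPrefixPos rest (acc + if t ≠ 1 then n else 0)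

-- m_idx = [i for i, (t, n) in enumerate(cigartuples) if t == 0]
def pvMIdx : List (Int × Int) → Nat → List Nat
  | [], _ => []
  | (t, _) :: rest, i => if t == 0 then i :: pvMIdx rest (i + 1) else pvMIdx rest (i + 1)

def find_M_range_alt (cigartuples : List (Int × Int)) : Int × Int :=
  let pos := pvPrefixPos cigartuples 0
  match pvMIdx cigartuples 0 with
  | [] => (0, 0)
  | i :: rest =>
    if rest = [] then (pos.getD i 0, pos.getD (i + 1) 0)
    else (pos.getD i 0, pos.getD (rest.getLastD 0) 0)

-- ===== PRECONDITION & SPEC =====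
def Spec_find_M_range (cigartuples : List (Int × Int)) (out : Int × Int) : Prop := out = find_M_range_alt cigartuples
instance (cigartuples : List (Int × Int)) (out : Int × Int) : Decidable (Spec_find_M_range cigartuples out) := by unfold Spec_find_M_range; infer_instance

-- ===== CLAIM (what is proved, stated in full; the proofs are below) =====
def Claim_equal_find_M_range : Prop := ∀ (cigartuples : List (Int × Int)), Dom_find_M_range cigartuples → Spec_find_M_range cigartuples (find_M_range cigartuples)

-- ===== LEMMAS AND PROOFS =====

-- sum of lengths excluding insertions
def pvS (l : List (Int × Int)) : Int := (l.map (fun p => if p.1 = 1 then 0 else p.2)).sum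

def pvIsM (p : Int × Int) : Bool := p.1 == 0

theorem pvS_nil : pvS [] = 0 := rfl
theorem pvS_cons (p : Int × Int) (l : List (Int × Int)) :
    pvS (p :: l) = (if p.1 = 1 then 0 else p.2) + pvS l := by
  simp [pvS]
theorem pvS_append (l₁ l₂ : List (Int × Int)) : pvS (l₁ ++ l₂) = pvS l₁ + pvS l₂ := by
  simp [pvS]

theorem pvCountLoop_eq (l : List (Int × Int)) (c : Int) :
    pvCountLoop l c = c + (l.countP pvIsM : Nat) := by
  induction l generalizing c with
  | nil => simp [pvCountLoop]
  | cons p rest ih =>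
    obtain ⟨t, n⟩ := p
    by_cases h : t = 0 <;> simp [pvCountLoop, h, ih, List.countP_cons, pvIsM] <;> ring

theorem pvSingleLoop_eq (pre : List (Int × Int)) (n : Int) (post : List (Int × Int)) (ms : Int)
    (hpre : ∀ q ∈ pre, q.1 ≠ 0) :
    pvSingleLoop (pre ++ (0, n) :: post) ms = (ms + pvS pre, ms + pvS pre + n) := by
  induction pre generalizing ms with
  | nil => simp [pvSingleLoop, pvS]
  | cons q rest ih =>
    obtain ⟨t, m⟩ := q
    have ht : t ≠ 0 := hpre (t, m) (by simp)
    have hrest : ∀ q ∈ rest, q.1 ≠ 0 := fun q hq => hpre q (by simp [hq])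
    by_cases h1 : t = 1
    · simp [pvSingleLoop, ht, h1, ih _ hrest, pvS_cons]
    · simp only [List.cons_append, pvSingleLoop]
      rw [if_pos ⟨ht, h1⟩, ih _ hrest, pvS_cons, if_neg h1]
      simp only [Prod.mk.injEq]
      constructor <;> ring

theorem pvMultiLoop_phase1 (pre rest : List (Int × Int)) (ms ml mc : Int)
    (hpre : ∀ q ∈ pre, q.1 ≠ 0) :
    pvMultiLoop (pre ++ rest) 0 ms ml mc = pvMultiLoop rest 0 (ms + pvS pre) ml mc := by
  induction pre generalizing ms with
  | nil => simp [pvS]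
  | cons q pre' ih =>
    obtain ⟨t, m⟩ := q
    have ht : t ≠ 0 := hpre (t, m) (by simp)
    have hpre' : ∀ q ∈ pre', q.1 ≠ 0 := fun q hq => hpre q (by simp [hq])
    by_cases h1 : t = 1
    · simp [pvMultiLoop, ht, h1, ih _ hpre', pvS_cons]
    · simp only [List.cons_append, pvMultiLoop]
      rw [if_pos ⟨rfl, ht, h1⟩, ih _ hpre', pvS_cons, if_neg h1]
      ring_nf

theorem pvMultiLoop_phase2 (mid : List (Int × Int)) (b : Int) (post : List (Int × Int))
    (fm ms ml mc : Int) (hfm : 1 ≤ fm)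
    (hc : fm + (mid.countP pvIsM : Nat) + 1 = mc) :
    pvMultiLoop (mid ++ (0, b) :: post) fm ms ml mc = (ms, ms + ml + pvS mid) := by
  induction mid generalizing fm ml with
  | nil =>
    simp only [List.nil_append, pvMultiLoop]
    have h0 : ¬ (fm == 0 ∧ (0:Int) ≠ 0 ∧ (0:Int) ≠ 1) := by simp
    have hmc : fm + 1 = mc := by simpa using hc
    simp [h0, hmc, pvS]
  | cons q mid' ih =>
    obtain ⟨t, m⟩ := q
    have hfm0 : ¬ (fm == 0) := by simp; omega
    by_cases ht : t = 0
    · have hcount : (((t, m) :: mid').countP pvIsM : Int) = (mid'.countP pvIsM : Nat) + 1 := by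
        simp [List.countP_cons, pvIsM, ht]
      have hlt : fm + 1 < mc := by omega
      simp only [List.cons_append, pvMultiLoop]
      rw [if_neg (by simp [ht]), if_neg (by simp [ht]), if_pos (by simp [ht]), if_pos hlt,
        ih (fm + 1) (ml + m) (by omega) (by push_cast at hc ⊢; omega), pvS_cons]
      simp [ht]
      ring_nf
    · by_cases h1 : t = 1
      · simp only [List.cons_append, pvMultiLoop]
        rw [if_neg (by simp [hfm0]), if_neg (by simp [h1]), if_neg (by simp [h1]),
          ih fm ml hfm (by simpa [List.countP_cons, pvIsM, ht] using hc), pvS_cons]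
        simp [h1]
      · simp only [List.cons_append, pvMultiLoop]
        rw [if_neg (by simp [hfm0]), if_pos ⟨by omega, ht, h1⟩,
          ih fm (ml + m) hfm (by simpa [List.countP_cons, pvIsM, ht] using hc), pvS_cons]
        simp [h1]
        ring_nf

-- B-side lemmas
theorem pvPrefixPos_getD (l : List (Int × Int)) (acc : Int) (i : Nat) (hi : i ≤ l.length) :
    (pvPrefixPos l acc).getD i 0 = acc + pvS (l.take i) := by
  induction l generalizing acc i with
  | nil =>
    have hi0 : i = 0 := by simpa using hi
    subst hi0; simp [pvPrefixPos, pvS]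
  | cons p rest ih =>
    obtain ⟨t, n⟩ := p
    cases i with
    | zero => simp [pvPrefixPos, pvS]
    | succ j =>
      simp only [pvPrefixPos, List.getD_cons_succ, List.take_succ_cons]
      rw [ih _ j (by simpa using hi), pvS_cons]
      by_cases h1 : t = 1 <;> simp [h1] <;> ring

theorem pvMIdx_append (l₁ l₂ : List (Int × Int)) (k : Nat) :
    pvMIdx (l₁ ++ l₂) k = pvMIdx l₁ k ++ pvMIdx l₂ (k + l₁.length) := by
  induction l₁ generalizing k with
  | nil => simp [pvMIdx]
  | cons p rest ih =>
    obtain ⟨t, n⟩ := p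
    by_cases ht : t = 0 <;>
      simp [pvMIdx, ht, ih, Nat.add_assoc, Nat.add_comm 1 rest.length]

theorem pvMIdx_nil_of_noM (l : List (Int × Int)) (k : Nat) (h : ∀ q ∈ l, q.1 ≠ 0) :
    pvMIdx l k = [] := by
  induction l generalizing k with
  | nil => rfl
  | cons p rest ih =>
    obtain ⟨t, n⟩ := p
    have ht : t ≠ 0 := h (t, n) (by simp)
    simp [pvMIdx, ht, ih _ fun q hq => h q (by simp [hq])]

theorem pv_noM_of_countP_zero (l : List (Int × Int)) (h : l.countP pvIsM = 0) :
    ∀ q ∈ l, q.1 ≠ 0 := by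
  intro q hq
  have := (List.countP_eq_zero.mp h) q hq
  simpa [pvIsM] using this

-- first-M decomposition
theorem pv_first_M (l : List (Int × Int)) (h : 0 < l.countP pvIsM) :
    ∃ pre n post, l = pre ++ (0, n) :: post ∧ pre.countP pvIsM = 0 := by
  induction l with
  | nil => simp at h
  | cons p rest ih =>
    obtain ⟨t, n⟩ := p
    by_cases ht : t = 0
    · exact ⟨[], n, rest, by simp [ht], by simp⟩
    · have h' : 0 < rest.countP pvIsM := by simpa [List.countP_cons, pvIsM, ht] using h
      obtain ⟨pre, m, post, heq, hpre⟩ := ih h'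
      refine ⟨(t, n) :: pre, m, post, by simp [heq], ?_⟩
      rw [List.countP_cons, hpre]
      simp [pvIsM, ht]

-- last-M decomposition
theorem pv_last_M (l : List (Int × Int)) (h : 0 < l.countP pvIsM) :
    ∃ pre n post, l = pre ++ (0, n) :: post ∧ post.countP pvIsM = 0 := by
  induction l with
  | nil => simp at h
  | cons p rest ih =>
    obtain ⟨t, n⟩ := p
    by_cases hr : 0 < rest.countP pvIsM
    · obtain ⟨pre, m, post, heq, hpost⟩ := ih hr
      exact ⟨(t, n) :: pre, m, post, by simp [heq], hpost⟩
    · have hr0 : rest.countP pvIsM = 0 := by omega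
      have ht : t = 0 := by
        by_contra ht
        rw [List.countP_cons, hr0] at h
        simp [pvIsM, ht] at h
      exact ⟨[], n, rest, by simp [ht], hr0⟩

-- main theorem
theorem pv_main (l : List (Int × Int)) : find_M_range l = find_M_range_alt l := by
  rcases Nat.lt_or_ge 0 (l.countP pvIsM) with hpos | hzero
  · -- at least one M: decompose at the first M
    obtain ⟨pre, n, post, heq, hpre0⟩ := pv_first_M l hpos
    have hpre : ∀ q ∈ pre, q.1 ≠ 0 := pv_noM_of_countP_zero pre hpre0
    have hcount : l.countP pvIsM = 1 + post.countP pvIsM := by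
      subst heq
      simp [List.countP_append, List.countP_cons, hpre0, pvIsM]
      omega
    have hcnt : pvCountLoop l 0 = (1 : Int) + (post.countP pvIsM : Nat) := by
      rw [pvCountLoop_eq]; push_cast [hcount]; ring
    by_cases hz : post.countP pvIsM = 0
    · -- exactly one M
      have hpost : ∀ q ∈ post, q.1 ≠ 0 := pv_noM_of_countP_zero post hz
      have hA : find_M_range l = (pvS pre, pvS pre + n) := by
        rw [find_M_range, hcnt, hz]
        simp only [Nat.cast_zero, add_zero, if_pos (by simp : (1:Int) == 1)]
        rw [heq, pvSingleLoop_eq pre n post 0 hpre]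
        simp
      have hMIdx : pvMIdx l 0 = [pre.length] := by
        rw [heq, pvMIdx_append, pvMIdx_nil_of_noM pre 0 hpre]
        simp [pvMIdx, pvMIdx_nil_of_noM post _ hpost]
      have hB : find_M_range_alt l = (pvS pre, pvS pre + n) := by
        rw [find_M_range_alt]
        simp only [hMIdx]
        simp only [if_true]
        rw [pvPrefixPos_getD _ _ _ (by rw [heq]; simp),
          pvPrefixPos_getD _ _ _ (by rw [heq]; simp)]
        rw [heq]
        rw [List.take_left' rfl]
        rw [show pre.length + 1 = (pre ++ [((0:Int), n)]).length by simp]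
        rw [show pre ++ (0, n) :: post = (pre ++ [(0, n)]) ++ post by simp]
        rw [List.take_left' rfl]
        simp [pvS_append, pvS_cons, pvS_nil]
      rw [hA, hB]
    · -- at least two Ms: decompose post at its last M
      obtain ⟨mid, b, post2, heqp, hpost2⟩ := pv_last_M post (by omega)
      have hpost2' : ∀ q ∈ post2, q.1 ≠ 0 := pv_noM_of_countP_zero post2 hpost2
      have hmc1 : ¬ (((1 : Int) + (post.countP pvIsM : Nat) == 1) = true) := by
        rw [beq_iff_eq]
        push_cast
        omega
      have hmcgt : (1 : Int) + (post.countP pvIsM : Nat) > 1 := by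
        have : 0 < post.countP pvIsM := by omega
        push_cast; omega
      have hcm : post.countP pvIsM = mid.countP pvIsM + 1 := by
        rw [heqp]; simp [List.countP_append, List.countP_cons, hpost2, pvIsM]
      have hA : find_M_range l = (pvS pre, pvS pre + (n + pvS mid)) := by
        rw [find_M_range, hcnt]
        simp only [if_neg hmc1, if_pos hmcgt]
        obtain ⟨mc, hmcdef⟩ : ∃ mc : Int, mc = 1 + (post.countP pvIsM : Nat) := ⟨_, rfl⟩
        rw [← hmcdef, heq, pvMultiLoop_phase1 pre _ 0 0 _ hpre, heqp]
        simp only [pvMultiLoop]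
        rw [if_neg (by simp), if_neg (by simp), if_pos (by simp)]
        have hlt : (0:Int) + 1 < mc := by rw [hmcdef]; push_cast; omega
        rw [if_pos hlt,
          pvMultiLoop_phase2 mid b post2 (0 + 1) (0 + pvS pre) (0 + n) mc (by omega)
            (by rw [hmcdef, hcm]; push_cast; ring)]
        simp only [Prod.mk.injEq]
        constructor <;> ring
      have hMIdx : ∃ rest, pvMIdx l 0 = pre.length :: rest ∧ rest ≠ [] ∧
          rest.getLastD 0 = pre.length + 1 + mid.length := by
        rw [heq, pvMIdx_append, pvMIdx_nil_of_noM pre 0 hpre]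
        simp only [List.nil_append, Nat.zero_add]
        simp only [pvMIdx, if_pos (by simp : ((0:Int) == 0) = true)]
        refine ⟨pvMIdx post (pre.length + 1), rfl, ?_, ?_⟩
        · rw [heqp, pvMIdx_append]
          simp [pvMIdx, pvMIdx_nil_of_noM post2 _ hpost2']
        · rw [heqp, pvMIdx_append]
          simp only [pvMIdx, if_pos (by simp : ((0:Int) == 0) = true),
            pvMIdx_nil_of_noM post2 _ hpost2']
          rw [List.getLastD_concat]
      obtain ⟨rest, hmi, hrne, hlast⟩ := hMIdx
      have hB : find_M_range_alt l = (pvS pre, pvS pre + (n + pvS mid)) := by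
        rw [find_M_range_alt]
        simp only [hmi]
        rw [if_neg hrne, hlast,
          pvPrefixPos_getD _ _ _ (by rw [heq]; simp),
          pvPrefixPos_getD _ _ _ (by rw [heq, heqp]; simp; omega)]
        rw [heq, List.take_left' rfl, heqp]
        rw [show pre ++ (0, n) :: (mid ++ (0, b) :: post2)
            = (pre ++ (0, n) :: mid) ++ (0, b) :: post2 by simp]
        rw [List.take_left' (by simp; omega)]
        simp [pvS_append, pvS_cons]
      rw [hA, hB]
  · -- no M at all
    have hz : l.countP pvIsM = 0 := by omega
    have hno : ∀ q ∈ l, q.1 ≠ 0 := pv_noM_of_countP_zero l hz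
    have hA : find_M_range l = (0, 0) := by
      rw [find_M_range, pvCountLoop_eq, hz]
      norm_num
    have hB : find_M_range_alt l = (0, 0) := by
      rw [find_M_range_alt, pvMIdx_nil_of_noM l 0 hno]
    rw [hA, hB]

-- ===== VERDICT (by name: the statement is the Claim_ definition above) =====
theorem find_M_range_spec : Claim_equal_find_M_range := by
  intro l _
  exact pv_main l
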